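-- pv_equiv track=rewrite | github.com/DAMSlabUMBC/Pub-Sub-Privacy | benchmark/GlobalDefs.py | find_described_purposes
-- ===== SOURCE A (Python) =====
-- import itertools
--
-- def find_described_purposes(purpose_filter: str) -> list[str]:
--
--     # Break purpose filter into individual purposes
--     filter_levels = purpose_filter.split('/')
--     decomposed_levels = list()
--
--     for level in filter_levels:
--         if '{' in level:
--             new_level = level.replace('{','').replace('}','').split(',')
--         else:
--             new_level = [level]
--
--         decomposed_levels.append(new_level)
--
--     described_purposes = list()
--     decomposed_purpose_list = itertools.product(*decomposed_levels)
--     for purpose_list in decomposed_purpose_list: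
--         purpose = '/'.join(purpose_list)
--         if not './' in purpose:
--             purpose = purpose.replace('/.', '')
--             described_purposes.append(purpose)
--
--     return described_purposes
-- ===== SOURCE B (Python) =====
-- def find_described_purposes(purpose_filter: str) -> list[str]:
--     # Same parsing; emission replaces the itertools.product pass by a
--     # recursive prefix-accumulator that never builds the tuple list.
--     decomposed_levels = [
--         level.replace('{', '').replace('}', '').split(',') if '{' in level else [level]
--         for level in purpose_filter.split('/')
--     ]
--
--     described_purposes = []
--
--     def go(index, prefix):
--         if index == len(decomposed_levels):
--             purpose = '/'.join(prefix)
--             if not './' in purpose: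
--                 described_purposes.append(purpose.replace('/.', ''))
--             return
--         for option in decomposed_levels[index]:
--             go(index + 1, prefix + [option])
--
--     go(0, [])
--     return described_purposes
-- ===== Notes on version B (the rewrite author's own statement) =====
-- stated objective: alternative
-- what changed: The itertools.product pass that materialises every tuple and then joins/filters it is replaced by a recursive prefix-accumulator go(index, prefix) that emits each joined purpose directly, never building the list of tuples.
import Mathlib
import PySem

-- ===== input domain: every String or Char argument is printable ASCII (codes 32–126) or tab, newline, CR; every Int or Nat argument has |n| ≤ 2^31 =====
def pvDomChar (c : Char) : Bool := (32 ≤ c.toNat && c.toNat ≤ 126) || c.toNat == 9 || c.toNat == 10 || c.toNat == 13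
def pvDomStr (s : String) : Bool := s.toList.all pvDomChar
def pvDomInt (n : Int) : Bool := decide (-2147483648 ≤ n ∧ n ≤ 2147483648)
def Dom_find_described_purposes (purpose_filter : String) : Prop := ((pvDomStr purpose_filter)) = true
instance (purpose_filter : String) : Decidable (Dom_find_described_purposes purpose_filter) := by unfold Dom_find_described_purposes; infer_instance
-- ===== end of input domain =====

-- B replaces A's itertools.product pass (materialise all tuples, then join/filter)
-- by a recursive prefix-accumulator emitting purposes directly; objective: alternative.

-- ===== PORT A =====
-- itertools.product(*levels), rightmost level varying fastest
def pvProduct (levels : List (List String)) : List (List String) :=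
  levels.foldr (fun lvl acc => lvl.flatMap (fun x => acc.map (x :: ·))) [[]]

def find_described_purposes (purpose_filter : String) : List String :=
  let filter_levels := (PySem.Str.split? purpose_filter "/").getD []   -- sep "/" ≠ "": never none
  let decomposed_levels :=
    filter_levels.foldl (fun acc level =>
      acc ++ [if PySem.Str.isIn "{" level then
                (PySem.Str.split? (PySem.Str.replace (PySem.Str.replace level "{" "") "}" "") ",").getD []
              else [level]]) []
  (pvProduct decomposed_levels).foldl (fun acc purpose_list =>
      let purpose := PySem.Str.join "/" purpose_list
      if !PySem.Str.isIn "./" purpose then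
        acc ++ [PySem.Str.replace purpose "/." ""]
      else acc) []

-- ===== PORT B =====
-- go index prefix — structural recursion over the remaining levels, prefix accumulated
def pvGo : List (List String) → List String → List String
  | [], pre =>
      let purpose := PySem.Str.join "/" pre
      if !PySem.Str.isIn "./" purpose then [PySem.Str.replace purpose "/." ""] else []
  | lvl :: rest, pre => lvl.flatMap (fun option => pvGo rest (pre ++ [option]))

def find_described_purposes_alt (purpose_filter : String) : List String :=
  let decomposed_levels :=
    ((PySem.Str.split? purpose_filter "/").getD []).map (fun level =>
      if PySem.Str.isIn "{" level then
        (PySem.Str.split? (PySem.Str.replace (PySem.Str.replace level "{" "") "}" "") ",").getD []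
      else [level])
  pvGo decomposed_levels []

-- ===== PRECONDITION & SPEC =====
def Spec_find_described_purposes (purpose_filter : String) (out : List String) : Prop := out = find_described_purposes_alt purpose_filter
instance (purpose_filter : String) (out : List String) : Decidable (Spec_find_described_purposes purpose_filter out) := by unfold Spec_find_described_purposes; infer_instance

-- ===== CLAIM (what is proved, stated in full; the proofs are below) =====
def Claim_equal_find_described_purposes : Prop := ∀ (purpose_filter : String), Dom_find_described_purposes purpose_filter → Spec_find_described_purposes purpose_filter (find_described_purposes purpose_filter)

-- ===== LEMMAS AND PROOFS =====

theorem map_filter_eq_flatMap {α β : Type} (p : α → Bool) (f : α → β) (l : List α) :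
    (l.filter p).map f = l.flatMap (fun x => if p x then [f x] else []) := by
  induction l with
  | nil => rfl
  | cons x xs ih => by_cases h : p x <;> simp [h, ih]

theorem flatMap_product_eq_pvGo (levels : List (List String)) (pre : List String) :
    (pvProduct levels).flatMap (fun pl => pvGo [] (pre ++ pl)) = pvGo levels pre := by
  induction levels generalizing pre with
  | nil => simp [pvProduct, pvGo]
  | cons lvl rest ih =>
    show (lvl.flatMap fun x => (pvProduct rest).map (x :: ·)).flatMap
        (fun pl => pvGo [] (pre ++ pl)) = lvl.flatMap (fun option => pvGo rest (pre ++ [option]))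
    rw [List.flatMap_assoc]
    refine List.flatMap_congr ?_
    intro x _
    rw [List.flatMap_def, List.map_map]
    have : ((fun pl => pvGo [] (pre ++ pl)) ∘ (x :: ·))
        = fun pl => pvGo [] ((pre ++ [x]) ++ pl) := by
      funext pl; simp
    rw [this, ← List.flatMap_def, ih]

-- ===== VERDICT (by name: the statement is the Claim_ definition above) =====
theorem find_described_purposes_spec : Claim_equal_find_described_purposes := by
  intro s _
  show find_described_purposes s = find_described_purposes_alt s
  simp only [find_described_purposes, find_described_purposes_alt]
  rw [PySem.List.foldl_append_singleton_eq_map, List.nil_append,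
      PySem.List.foldl_append_if, List.nil_append, map_filter_eq_flatMap]
  have := flatMap_product_eq_pvGo
    ((((PySem.Str.split? s "/").getD []).map (fun level =>
      if PySem.Str.isIn "{" level then
        (PySem.Str.split? (PySem.Str.replace (PySem.Str.replace level "{" "") "}" "") ",").getD []
      else [level]))) []
  simpa [pvGo] using this
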